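-- pv_equiv track=rewrite | github.com/ch99q/quantum-research | projects/rctar/analyse.py | remap_counts
-- ===== SOURCE A (Python) =====
-- def remap_counts(counts, qubit_line):
--     """Remap counts from physical to logical qubits"""
--     physical_to_logical = {phys: log for log, phys in enumerate(qubit_line)}
--     remapped_counts = {}
--
--     for bitstring, count in counts.items():
--         remapped_bits = ['0'] * len(qubit_line)
--         for phys_pos, bit in enumerate(bitstring):
--             if phys_pos in physical_to_logical:
--                 logical_pos = physical_to_logical[phys_pos]
--                 remapped_bits[logical_pos] = bit
--         remapped_key = ''.join(remapped_bits)
--         remapped_counts[remapped_key] = remapped_counts.get(remapped_key, 0) + count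
--
--     return remapped_counts
-- ===== SOURCE B (Python) =====
-- def remap_counts(counts, qubit_line):
--     """Remap counts from physical to logical qubit order: logical slot i reads
--     the bit at physical position qubit_line[i]; positions beyond a bitstring
--     read '0'. Sources are sorted once so each bitstring only visits the
--     positions it actually covers."""
--     order = sorted((p, i) for i, p in enumerate(qubit_line) if p >= 0)
--     result = {}
--     for bitstring, count in counts.items():
--         bits = ['0'] * len(qubit_line)
--         for p, i in order:
--             if p >= len(bitstring):
--                 break
--             bits[i] = bitstring[p]
--         key = ''.join(bits)
--         result[key] = result.get(key, 0) + count
--     return result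
-- ===== Notes on version B (the rewrite author's own statement) =====
-- stated objective: alternative
-- what changed: Replaces A's physical-to-logical dict plus per-bit scatter over each bitstring with a sort-then-scan: the (physical, logical) source pairs are sorted once and each bitstring writes only its in-range sources, breaking early on the sorted list; Pre_ excludes qubit_line with a duplicated physical index reaching inside some bitstring, where A's last-dict-insertion-wins choice among equal physical indices is accidental.
-- outside the precondition, e.g. on remap_counts({'01': 3}, [1, 1]): A returns {'01': 3}, B returns {'11': 3}
import Mathlib
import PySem

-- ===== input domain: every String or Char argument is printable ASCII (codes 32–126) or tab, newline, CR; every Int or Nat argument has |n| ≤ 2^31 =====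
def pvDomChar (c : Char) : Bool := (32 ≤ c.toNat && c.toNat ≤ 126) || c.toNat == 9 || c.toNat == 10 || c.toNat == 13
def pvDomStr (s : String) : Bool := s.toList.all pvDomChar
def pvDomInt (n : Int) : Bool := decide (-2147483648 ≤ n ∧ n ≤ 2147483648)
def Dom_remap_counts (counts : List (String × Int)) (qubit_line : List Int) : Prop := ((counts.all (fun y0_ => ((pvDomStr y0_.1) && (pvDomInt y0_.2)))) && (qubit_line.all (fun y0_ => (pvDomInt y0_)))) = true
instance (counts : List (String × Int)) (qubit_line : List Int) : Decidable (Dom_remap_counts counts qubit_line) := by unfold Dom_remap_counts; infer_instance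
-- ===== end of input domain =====

-- B replaces A's physical→logical dict + per-bit scatter with a sort-then-scan:
-- the (physical, logical) source pairs are sorted once and each bitstring writes
-- only its in-range sources, breaking early on the sorted list (objective: alternative).

-- ===== PORT A =====
-- physical_to_logical = {phys: log for log, phys in enumerate(qubit_line)}
def buildP2L (qubit_line : List Int) : PySem.Dict Int Int :=
  (PySem.List.enumerate qubit_line 0).foldl (fun d p => d.insert p.2 p.1) PySem.Dict.empty

-- inner loop: remapped_bits = ['0']*len(qubit_line); for phys_pos, bit in enumerate(bitstring): …
def remapBitsA (p2l : PySem.Dict Int Int) (n : Nat) (bs : List Char) : List Char :=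
  (PySem.List.enumerate bs 0).foldl
    (fun bits p =>
      if p2l.contains p.1 then PySem.List.pySetD bits (p2l.getD p.1 0) p.2 else bits)
    (List.replicate n '0')

def remap_counts (counts : List (String × Int)) (qubit_line : List Int) : List (String × Int) :=
  let p2l := buildP2L qubit_line
  ((PySem.Dict.ofList counts).items.foldl
    (fun d p =>
      let key := String.ofList (remapBitsA p2l qubit_line.length p.1.toList)
      d.insert key (d.getD key 0 + p.2))
    PySem.Dict.empty).items

-- ===== PORT B =====
-- order = sorted((p, i) for i, p in enumerate(qubit_line) if p >= 0)
def srcPairs (qubit_line : List Int) : List (Int × Int) :=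
  ((PySem.List.enumerate qubit_line 0).filter (fun x => decide (0 ≤ x.2))).map
    (fun x => (x.2, x.1))

def orderB (qubit_line : List Int) : List (Int × Int) :=
  PySem.List.sorted2 (srcPairs qubit_line) (fun x => x.1) (fun x => x.2) false

-- bits = ['0']*n; for p, i in order: if p >= len(bitstring): break; bits[i] = bitstring[p]
def remapBitsB (order : List (Int × Int)) (n : Nat) (bs : List Char) : List Char :=
  (order.takeWhile (fun x => decide (x.1 < (bs.length : Int)))).foldl
    (fun bits x => PySem.List.pySetD bits x.2 (PySem.List.pyGetD bs x.1 '0'))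
    (List.replicate n '0')

def remap_counts_alt (counts : List (String × Int)) (qubit_line : List Int) : List (String × Int) :=
  let order := orderB qubit_line
  ((PySem.Dict.ofList counts).items.foldl
    (fun d p =>
      let key := String.ofList (remapBitsB order qubit_line.length p.1.toList)
      d.insert key (d.getD key 0 + p.2))
    PySem.Dict.empty).items

-- ===== PRECONDITION & SPEC =====
-- Pre_ excludes qubit_line containing a duplicated physical index that falls inside some
-- bitstring of counts: there A's dict keeps only the last duplicate (accidental
-- last-insertion-wins) while B fills every logical slot naming that position.
def Pre_remap_counts (counts : List (String × Int)) (qubit_line : List Int) : Prop :=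
  ∀ v ∈ qubit_line, qubit_line.count v ≤ 1 ∨
    ∀ p ∈ counts, ¬(0 ≤ v ∧ v < (p.1.toList.length : Int))
instance (counts : List (String × Int)) (qubit_line : List Int) : Decidable (Pre_remap_counts counts qubit_line) := by unfold Pre_remap_counts; infer_instance

def pvWitness_remap_counts : (List (String × Int)) × List Int := ([("01", 2)], [1, 0])

def Spec_remap_counts (counts : List (String × Int)) (qubit_line : List Int) (out : List (String × Int)) : Prop := out = remap_counts_alt counts qubit_line
instance (counts : List (String × Int)) (qubit_line : List Int) (out : List (String × Int)) : Decidable (Spec_remap_counts counts qubit_line out) := by unfold Spec_remap_counts; infer_instance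

-- ===== CLAIM (what is proved, stated in full; the proofs are below) =====
def Claim_equal_remap_counts : Prop := ∀ (counts : List (String × Int)) (qubit_line : List Int), Dom_remap_counts counts qubit_line → Pre_remap_counts counts qubit_line → Spec_remap_counts counts qubit_line (remap_counts counts qubit_line)

-- ===== LEMMAS AND PROOFS =====

-- ---------- A side: the dict maps a physical position to its LAST logical index ----------

-- index of the LAST occurrence of v in xs
def lastIdx? : List Int → Int → Option Nat
  | [], _ => none
  | x :: xs, v =>
    match lastIdx? xs v with
    | some k => some (k + 1)
    | none => if x = v then some 0 else none

theorem lastIdx?_eq_none_iff (xs : List Int) (v : Int) : lastIdx? xs v = none ↔ v ∉ xs := by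
  induction xs with
  | nil => simp [lastIdx?]
  | cons x xs ih =>
    cases h : lastIdx? xs v with
    | some k =>
      have hv : v ∈ xs := by by_contra hc; simp [ih.mpr hc] at h
      simp [lastIdx?, h, hv]
    | none =>
      have hv := ih.mp h
      by_cases hx2 : x = v
      · simp [lastIdx?, h, hx2, hv]
      · have hvx : ¬ v = x := fun h' => hx2 h'.symm
        simp [lastIdx?, h, hx2, hvx, hv]

theorem lastIdx?_getElem {xs : List Int} {v : Int} {k : Nat} (h : lastIdx? xs v = some k) :
    ∃ hk : k < xs.length, xs[k] = v := by
  induction xs generalizing k with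
  | nil => simp [lastIdx?] at h
  | cons x xs ih =>
    simp only [lastIdx?] at h
    cases hr : lastIdx? xs v with
    | some j =>
      rw [hr] at h; injection h with h; subst h
      obtain ⟨hj, he⟩ := ih hr
      exact ⟨by simpa using Nat.succ_lt_succ hj, by simpa using he⟩
    | none =>
      rw [hr] at h; by_cases hx : x = v <;> simp [hx] at h
      subst h; exact ⟨by simp, hx⟩

-- lastIdx? xs xs[i] = some i ↔ i is the last occurrence
theorem lastIdx?_self_iff (xs : List Int) (i : Nat) (hi : i < xs.length) :
    lastIdx? xs xs[i] = some i ↔ xs[i] ∉ xs.drop (i + 1) := by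
  induction xs generalizing i with
  | nil => simp at hi
  | cons x xs ih =>
    cases i with
    | zero =>
      simp only [List.getElem_cons_zero, List.drop_succ_cons, List.drop_zero, lastIdx?]
      cases hr : lastIdx? xs x with
      | some k =>
        obtain ⟨hk, he⟩ := lastIdx?_getElem hr
        have hv : x ∈ xs := he ▸ List.getElem_mem hk
        simp [hv]
      | none => simp [(lastIdx?_eq_none_iff xs x).mp hr]
    | succ i =>
      have hi' : i < xs.length := by simpa using hi
      simp only [List.getElem_cons_succ, List.drop_succ_cons, lastIdx?]
      rw [← ih i hi']
      cases hr : lastIdx? xs xs[i] with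
      | some k => simp
      | none => by_cases hx : x = xs[i] <;> simp [hx]

-- a value occurring at most once is its own last occurrence
theorem last_of_count_le_one (q : List Int) (j : Nat) (hj : j < q.length)
    (h : q.count q[j] ≤ 1) : lastIdx? q q[j] = some j := by
  rw [lastIdx?_self_iff q j hj]
  intro hmem
  have h1 : q[j] ∈ q.take (j + 1) := by
    have hjt : j < (q.take (j + 1)).length := by
      simp only [List.length_take]
      omega
    have hget : (q.take (j + 1))[j] = q[j] := List.getElem_take
    exact hget ▸ List.getElem_mem hjt
  have hc : (q.take (j+1)).count q[j] + (q.drop (j+1)).count q[j] = q.count q[j] := by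
    rw [← List.count_append, List.take_append_drop]
  have h2 : 0 < (q.take (j+1)).count q[j] := List.count_pos_iff.mpr h1
  have h3 : 0 < (q.drop (j+1)).count q[j] := List.count_pos_iff.mpr hmem
  omega

-- the built dict looks up the last index of a physical position
theorem get?_foldl_insert_enum (xs : List Int) (s : Int) (d : PySem.Dict Int Int) (v : Int) :
    ((PySem.List.enumerate xs s).foldl (fun d p => d.insert p.2 p.1) d).get? v =
      match lastIdx? xs v with
      | some k => some (s + k)
      | none => d.get? v := by
  induction xs generalizing s d with
  | nil => simp [PySem.List.enumerate_nil, lastIdx?]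
  | cons x xs ih =>
    rw [PySem.List.enumerate_cons]
    simp only [List.foldl_cons, lastIdx?]
    rw [ih]
    cases hr : lastIdx? xs v with
    | some k =>
      push_cast; ring_nf
    | none =>
      rw [PySem.Dict.get?_insert]
      by_cases hx : x = v
      · subst hx; simp
      · have hvx : ¬ v = x := fun h' => hx h'.symm
        simp [hx, hvx]

theorem get?_buildP2L (q : List Int) (v : Int) :
    (buildP2L q).get? v = (lastIdx? q v).map (fun k => (k : Int)) := by
  rw [buildP2L, get?_foldl_insert_enum]
  cases h : lastIdx? q v with
  | some k => simp
  | none => simp [PySem.Dict.get?_empty]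

-- one scatter step leaves slot j alone unless j is the target
theorem scatter_step_untouched (q : List Int) (bits : List Char) (c : Char) (s : Int) (j : Nat)
    (h : ∀ k, lastIdx? q s = some k → k ≠ j) :
    (if (buildP2L q).contains s then
      PySem.List.pySetD bits ((buildP2L q).getD s 0) c else bits)[j]? = bits[j]? := by
  cases hk : lastIdx? q s with
  | none =>
    have hcont : (buildP2L q).contains s = false := by
      rw [PySem.Dict.contains_eq_isSome_get?, get?_buildP2L, hk]; rfl
    rw [if_neg (by simp [hcont])]
  | some k =>
    have hcont : (buildP2L q).contains s = true := by
      rw [PySem.Dict.contains_eq_isSome_get?, get?_buildP2L, hk]; rfl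
    have hgetD : (buildP2L q).getD s 0 = (k : Int) := by
      rw [PySem.Dict.getD_eq_get?_getD, get?_buildP2L, hk]; rfl
    rw [if_pos hcont, hgetD, PySem.List.pySetD_natCast,
      List.getElem?_set_ne (h k hk)]

-- A's scatter loop, characterised per output slot
theorem remapA_loop_getElem? (q : List Int) (bs : List Char) (s : Int) (bits : List Char)
    (j : Nat) (hj : j < q.length) (hblen : bits.length = q.length) :
    ((PySem.List.enumerate bs s).foldl
      (fun bits p =>
        if (buildP2L q).contains p.1 then
          PySem.List.pySetD bits ((buildP2L q).getD p.1 0) p.2 else bits)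
      bits)[j]? =
      if lastIdx? q q[j] = some j ∧ s ≤ q[j] ∧ q[j] < s + (bs.length : Int)
      then PySem.List.pyGet? bs (q[j] - s)
      else bits[j]? := by
  induction bs generalizing s bits with
  | nil =>
    simp only [PySem.List.enumerate_nil, List.foldl_nil, List.length_nil]
    rw [if_neg]; rintro ⟨-, h1, h2⟩; omega
  | cons c bs ih =>
    rw [PySem.List.enumerate_cons]
    simp only [List.foldl_cons]
    have hblen' : ((if (buildP2L q).contains s then
        PySem.List.pySetD bits ((buildP2L q).getD s 0) c else bits)).length = q.length := by
      split_ifs <;> simp [PySem.List.length_pySetD, hblen]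
    rw [ih _ _ hblen']
    by_cases hlast : lastIdx? q q[j] = some j
    · by_cases hs : q[j] = s
      · -- current position is the unique source for slot j
        have hl : lastIdx? q s = some j := by rw [← hs]; exact hlast
        rw [if_neg (by rw [← hs]; rintro ⟨-, h1, -⟩; omega)]
        have hcont : (buildP2L q).contains s = true := by
          rw [PySem.Dict.contains_eq_isSome_get?, get?_buildP2L, hl]; rfl
        have hgetD : (buildP2L q).getD s 0 = (j : Int) := by
          rw [PySem.Dict.getD_eq_get?_getD, get?_buildP2L, hl]; rfl
        rw [if_pos hcont, hgetD, PySem.List.pySetD_natCast]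
        rw [if_pos ⟨hlast, by omega, by simp only [List.length_cons]; push_cast; omega⟩]
        rw [← hs, sub_self, PySem.List.pyGet?_zero_cons]
        rw [List.getElem?_set_self (by omega)]
      · -- current position is not slot j's source: slot j untouched by this step
        have hne : ∀ k, lastIdx? q s = some k → k ≠ j := by
          intro k hk hkj; subst hkj
          obtain ⟨hk2, he⟩ := lastIdx?_getElem hk
          exact hs he
        rw [scatter_step_untouched q bits c s j hne]
        by_cases hr : s + 1 ≤ q[j] ∧ q[j] < s + 1 + (bs.length : Int)
        · rw [if_pos ⟨hlast, hr.1, hr.2⟩,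
            if_pos ⟨hlast, by omega, by simp only [List.length_cons]; push_cast; omega⟩]
          have h1 : q[j] - s = (q[j] - (s+1)) + 1 := by ring
          obtain ⟨t, ht⟩ : ∃ t : Nat, q[j] - (s+1) = (t : Int) := ⟨(q[j]-(s+1)).toNat, by omega⟩
          rw [h1, ht, PySem.List.pyGet?_cons_succ, ← ht]
        · rw [if_neg (by tauto), if_neg ?_]
          rintro ⟨-, h1, h2⟩
          simp only [List.length_cons] at h2; push_cast at h2
          exact hr ⟨by omega, by omega⟩
    · -- slot j is never a scatter target
      have hne : ∀ k, lastIdx? q s = some k → k ≠ j := by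
        intro k hk hkj; subst hkj
        obtain ⟨hk2, he⟩ := lastIdx?_getElem hk
        rw [← he] at hk
        exact absurd hk hlast
      rw [scatter_step_untouched q bits c s j hne, if_neg (by tauto), if_neg (by tauto)]

-- the scatter loop preserves the length of the bit list
theorem length_scatter (q : List Int) (l : List (Int × Char)) (bits : List Char) :
    (l.foldl
      (fun bits p =>
        if (buildP2L q).contains p.1 then
          PySem.List.pySetD bits ((buildP2L q).getD p.1 0) p.2 else bits)
      bits).length = bits.length := by
  induction l generalizing bits with
  | nil => rfl
  | cons p l ih =>
    simp only [List.foldl_cons]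
    rw [ih]
    split_ifs <;> simp [PySem.List.length_pySetD]

-- ---------- B side: sorted source pairs and the write loop ----------

-- the comparison sorted2 uses for tuple keys (fst, snd)
def lexB (a b : Int × Int) : Bool :=
  decide (a.1 < b.1) || (!decide (b.1 < a.1) && decide (a.2 < b.2))

theorem orderB_eq_foldl (q : List Int) :
    orderB q = (srcPairs q).foldl (fun acc x => PySem.List.insertBy lexB x acc) [] := rfl

theorem insertBy_lexB_pairwise (x : Int × Int) (ys : List (Int × Int))
    (h : ys.Pairwise (fun a b => a.1 ≤ b.1)) :
    (PySem.List.insertBy lexB x ys).Pairwise (fun a b => a.1 ≤ b.1) := by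
  induction ys with
  | nil => simp [PySem.List.insertBy]
  | cons y ys ih =>
    rw [List.pairwise_cons] at h
    obtain ⟨hy, hys⟩ := h
    by_cases hb : lexB x y = true
    · rw [show PySem.List.insertBy lexB x (y :: ys) = x :: y :: ys by
        simp [PySem.List.insertBy, hb]]
      have hxy : x.1 ≤ y.1 := by
        simp only [lexB, Bool.or_eq_true, Bool.and_eq_true, Bool.not_eq_eq_eq_not,
          Bool.not_true, decide_eq_true_eq, decide_eq_false_iff_not] at hb
        rcases hb with h1 | ⟨h1, -⟩ <;> omega
      rw [List.pairwise_cons]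
      refine ⟨?_, List.pairwise_cons.mpr ⟨hy, hys⟩⟩
      intro z hz
      rcases List.mem_cons.mp hz with rfl | hz'
      · exact hxy
      · exact le_trans hxy (hy z hz')
    · rw [show PySem.List.insertBy lexB x (y :: ys) = y :: PySem.List.insertBy lexB x ys by
        simp [PySem.List.insertBy, hb]]
      have hyx : y.1 ≤ x.1 := by
        by_contra hc
        refine hb ?_
        simp only [lexB, Bool.or_eq_true, Bool.and_eq_true, Bool.not_eq_eq_eq_not,
          Bool.not_true, decide_eq_true_eq, decide_eq_false_iff_not]
        omega
      rw [List.pairwise_cons]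
      refine ⟨?_, ih hys⟩
      intro z hz
      rcases (PySem.List.insertBy_mem_iff lexB x z ys).mp hz with rfl | hz'
      · exact hyx
      · exact hy z hz'

theorem foldl_insertBy_pairwise (l : List (Int × Int)) (acc : List (Int × Int))
    (h : acc.Pairwise (fun a b => a.1 ≤ b.1)) :
    (l.foldl (fun acc x => PySem.List.insertBy lexB x acc) acc).Pairwise
      (fun a b => a.1 ≤ b.1) := by
  induction l generalizing acc with
  | nil => exact h
  | cons x l ih =>
    simp only [List.foldl_cons]
    exact ih _ (insertBy_lexB_pairwise x acc h)

theorem foldl_insertBy_perm (l : List (Int × Int)) (acc : List (Int × Int)) :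
    (l.foldl (fun acc x => PySem.List.insertBy lexB x acc) acc).Perm (acc ++ l) := by
  induction l generalizing acc with
  | nil => simp
  | cons x l ih =>
    simp only [List.foldl_cons]
    refine (ih _).trans ?_
    refine ((PySem.List.insertBy_perm lexB x acc).append_right l).trans ?_
    exact List.perm_middle.symm

theorem orderB_perm (q : List Int) : (orderB q).Perm (srcPairs q) := by
  rw [orderB_eq_foldl]
  simpa using foldl_insertBy_perm (srcPairs q) []

theorem orderB_pairwise (q : List Int) :
    (orderB q).Pairwise (fun a b => a.1 ≤ b.1) := by
  rw [orderB_eq_foldl]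
  exact foldl_insertBy_pairwise _ [] (by simp)

theorem mem_srcPairs (q : List Int) (x : Int × Int) :
    x ∈ srcPairs q ↔ ∃ (k : Nat) (_ : k < q.length), x = (q[k], (k : Int)) ∧ 0 ≤ q[k] := by
  constructor
  · intro hx
    obtain ⟨y, hy, he⟩ := List.mem_map.mp hx
    obtain ⟨hy1, hy2⟩ := List.mem_filter.mp hy
    obtain ⟨k, hk, he2⟩ := (PySem.List.mem_enumerate_iff _ _ _).mp hy1
    subst he2
    simp only [decide_eq_true_eq] at hy2
    exact ⟨k, hk, by simp [← he], hy2⟩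
  · rintro ⟨k, hk, rfl, h0⟩
    apply List.mem_map.mpr
    refine ⟨((0 : Int) + k, q[k]), ?_, by simp⟩
    apply List.mem_filter.mpr
    refine ⟨(PySem.List.mem_enumerate_iff _ _ _).mpr ⟨k, hk, rfl⟩, by simpa using h0⟩

theorem mem_orderB (q : List Int) (x : Int × Int) :
    x ∈ orderB q ↔ ∃ (k : Nat) (_ : k < q.length), x = (q[k], (k : Int)) ∧ 0 ≤ q[k] := by
  rw [(orderB_perm q).mem_iff, mem_srcPairs]

theorem snd_srcPairs_nodup (q : List Int) : ((srcPairs q).map (·.2)).Nodup := by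
  have h1 : ((PySem.List.enumerate q 0).filter (fun x => decide (0 ≤ x.2))).Pairwise
      (fun p r => p.1 < r.1) :=
    List.Pairwise.sublist List.filter_sublist (PySem.List.pairwise_lt_enumerate q 0)
  have h2 : ((srcPairs q).map (·.2)).Pairwise (· < ·) := by
    rw [srcPairs, List.map_map]
    exact (List.pairwise_map).mpr h1
  exact h2.imp (fun h => ne_of_lt h)

theorem snd_orderB_nodup (q : List Int) : ((orderB q).map (·.2)).Nodup := by
  exact ((orderB_perm q).map (·.2)).nodup_iff.mpr (snd_srcPairs_nodup q)

theorem takeWhile_eq_filter_of_pairwise (m : Int) (l : List (Int × Int))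
    (h : l.Pairwise (fun a b => a.1 ≤ b.1)) :
    l.takeWhile (fun x => decide (x.1 < m)) = l.filter (fun x => decide (x.1 < m)) := by
  induction l with
  | nil => rfl
  | cons x l ih =>
    rw [List.pairwise_cons] at h
    by_cases hx : x.1 < m
    · simp [List.takeWhile_cons, List.filter_cons, hx, ih h.2]
    · simp only [List.takeWhile_cons, List.filter_cons, decide_eq_false hx]
      simp only [Bool.false_eq_true, if_false]
      symm
      rw [List.filter_eq_nil_iff]
      intro y hy
      simp only [decide_eq_true_eq]
      have := h.1 y hy
      omega

-- a write loop whose targets avoid slot j leaves slot j alone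
theorem foldl_write_untouched (bs : List Char) (ws : List (Int × Int)) (bits : List Char)
    (j : Nat) (hpos : ∀ x ∈ ws, 0 ≤ x.2) (hj : ∀ x ∈ ws, x.2 ≠ (j : Int)) :
    (ws.foldl (fun bits x => PySem.List.pySetD bits x.2 (PySem.List.pyGetD bs x.1 '0'))
      bits)[j]? = bits[j]? := by
  induction ws generalizing bits with
  | nil => rfl
  | cons x ws ih =>
    simp only [List.foldl_cons]
    rw [ih _ (fun y hy => hpos y (List.mem_cons_of_mem x hy))
        (fun y hy => hj y (List.mem_cons_of_mem x hy))]
    rw [PySem.List.pySetD_of_nonneg bits _ (hpos x (List.mem_cons_self))]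
    rw [List.getElem?_set_ne]
    have h1 := hpos x (List.mem_cons_self)
    have h2 := hj x (List.mem_cons_self)
    omega

-- the write loop, characterised per slot: the first (= only) write to j wins
theorem foldl_write_getElem? (bs : List Char) (ws : List (Int × Int)) (bits : List Char)
    (j : Nat) (hpos : ∀ x ∈ ws, 0 ≤ x.2) (hnd : (ws.map (·.2)).Nodup) :
    (ws.foldl (fun bits x => PySem.List.pySetD bits x.2 (PySem.List.pyGetD bs x.1 '0'))
      bits)[j]? =
      match ws.find? (fun x => x.2 == (j : Int)) with
      | some x => if j < bits.length then some (PySem.List.pyGetD bs x.1 '0') else none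
      | none => bits[j]? := by
  induction ws generalizing bits with
  | nil => simp
  | cons x ws ih =>
    simp only [List.foldl_cons, List.find?_cons]
    by_cases hx : x.2 = (j : Int)
    · rw [show (x.2 == (j : Int)) = true by simp [hx]]
      have hws : ∀ y ∈ ws, y.2 ≠ (j : Int) := by
        intro y hy he
        simp only [List.map_cons, List.nodup_cons] at hnd
        exact hnd.1 (by
          rw [hx, ← he]
          exact List.mem_map.mpr ⟨y, hy, rfl⟩)
      rw [foldl_write_untouched bs ws _ j (fun y hy => hpos y (List.mem_cons_of_mem x hy)) hws]
      rw [PySem.List.pySetD_of_nonneg bits _ (hpos x (List.mem_cons_self))]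
      have hxt : x.2.toNat = j := by omega
      rw [hxt]
      by_cases hlen : j < bits.length
      · rw [List.getElem?_set_self hlen]
        simp [hlen]
      · rw [List.getElem?_eq_none (by simpa using Nat.le_of_not_lt hlen)]
        simp [hlen]
    · rw [show (x.2 == (j : Int)) = false by simp [hx]]
      rw [ih _ (fun y hy => hpos y (List.mem_cons_of_mem x hy))
          (by simpa using (List.nodup_cons.mp (by simpa using hnd)).2)]
      have hL : (PySem.List.pySetD bits x.2 (PySem.List.pyGetD bs x.1 '0')).length
          = bits.length := PySem.List.length_pySetD _ _ _
      cases hf : ws.find? (fun x => x.2 == (j : Int)) with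
      | some y => simp [hf, hL]
      | none =>
        rw [PySem.List.pySetD_of_nonneg bits _ (hpos x (List.mem_cons_self))]
        have h1 := hpos x (List.mem_cons_self)
        have hne : x.2.toNat ≠ j := by omega
        simp [hf, List.getElem?_set_ne hne]

-- the write loop preserves the length of the bit list
theorem length_foldl_write (bs : List Char) (ws : List (Int × Int)) (bits : List Char) :
    (ws.foldl (fun bits x => PySem.List.pySetD bits x.2 (PySem.List.pyGetD bs x.1 '0'))
      bits).length = bits.length := by
  induction ws generalizing bits with
  | nil => rfl
  | cons x ws ih =>
    simp only [List.foldl_cons]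
    rw [ih, PySem.List.length_pySetD]

-- B's bit list, characterised per slot: a direct gather
theorem remapBitsB_getElem? (q : List Int) (bs : List Char) (j : Nat) (hj : j < q.length) :
    (remapBitsB (orderB q) q.length bs)[j]? =
      if 0 ≤ q[j] ∧ q[j] < (bs.length : Int)
      then some (PySem.List.pyGetD bs q[j] '0') else some '0' := by
  have hw : (orderB q).takeWhile (fun x => decide (x.1 < (bs.length : Int)))
      = (orderB q).filter (fun x => decide (x.1 < (bs.length : Int))) :=
    takeWhile_eq_filter_of_pairwise _ _ (orderB_pairwise q)
  have hsub : ∀ x ∈ (orderB q).filter (fun x => decide (x.1 < (bs.length : Int))),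
      x ∈ orderB q := fun x hx => (List.mem_filter.mp hx).1
  have hpos : ∀ x ∈ (orderB q).filter (fun x => decide (x.1 < (bs.length : Int))), 0 ≤ x.2 := by
    intro x hx
    obtain ⟨k, hk, rfl, -⟩ := (mem_orderB q x).mp (hsub x hx)
    simp
  have hnd : (((orderB q).filter (fun x => decide (x.1 < (bs.length : Int)))).map (·.2)).Nodup :=
    List.Nodup.sublist (List.Sublist.map _ List.filter_sublist) (snd_orderB_nodup q)
  rw [remapBitsB, hw, foldl_write_getElem? bs _ _ j hpos hnd]
  by_cases hin : 0 ≤ q[j] ∧ q[j] < (bs.length : Int)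
  · have hmem : ((q[j], (j : Int)) : Int × Int)
        ∈ (orderB q).filter (fun x => decide (x.1 < (bs.length : Int))) := by
      rw [List.mem_filter]
      exact ⟨(mem_orderB q _).mpr ⟨j, hj, rfl, hin.1⟩, by simp [hin.2]⟩
    cases hf : ((orderB q).filter (fun x => decide (x.1 < (bs.length : Int)))).find?
        (fun x => x.2 == (j : Int)) with
    | none =>
      exact absurd (by simp : (((q[j], (j : Int)) : Int × Int).2 == (j : Int)) = true)
        (by simpa using List.find?_eq_none.mp hf _ hmem)
    | some x =>
      have hx2 : x.2 = (j : Int) := by simpa using List.find?_some hf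
      obtain ⟨k, hk, hxe, -⟩ := (mem_orderB q x).mp (hsub x (List.mem_of_find?_eq_some hf))
      have hkj : k = j := by
        rw [hxe] at hx2
        simp at hx2
        omega
      subst hkj
      rw [if_pos hin]
      simp [hxe, hj]
  · cases hf : ((orderB q).filter (fun x => decide (x.1 < (bs.length : Int)))).find?
        (fun x => x.2 == (j : Int)) with
    | some x =>
      exfalso
      have hx2 : x.2 = (j : Int) := by simpa using List.find?_some hf
      have hxm := List.mem_of_find?_eq_some hf
      obtain ⟨k, hk, hxe, h0⟩ := (mem_orderB q x).mp (hsub x hxm)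
      have hkj : k = j := by
        rw [hxe] at hx2
        simp at hx2
        omega
      subst hkj
      have hlt : x.1 < (bs.length : Int) := by
        have := (List.mem_filter.mp hxm).2
        simpa using this
      rw [hxe] at hlt
      exact hin ⟨h0, hlt⟩
    | none =>
      rw [if_neg hin, List.getElem?_replicate_of_lt hj]

-- ---------- the keys agree ----------

theorem key_eq (q : List Int) (bs : List Char)
    (hbs : ∀ v ∈ q, q.count v ≤ 1 ∨ ¬(0 ≤ v ∧ v < (bs.length : Int))) :
    remapBitsA (buildP2L q) q.length bs = remapBitsB (orderB q) q.length bs := by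
  apply List.ext_getElem?
  intro j
  by_cases hj : j < q.length
  · rw [remapBitsA, remapA_loop_getElem? q bs 0 _ j hj (by simp),
      remapBitsB_getElem? q bs j hj]
    by_cases hin : 0 ≤ q[j] ∧ q[j] < (bs.length : Int)
    · have hcount : q.count q[j] ≤ 1 :=
        (hbs q[j] (List.getElem_mem hj)).resolve_right (by tauto)
      have hlast : lastIdx? q q[j] = some j := last_of_count_le_one q j hj hcount
      rw [if_pos ⟨hlast, hin.1, by simpa using hin.2⟩, if_pos hin, sub_zero]
      rw [PySem.List.pyGet?_eq_some_getElem bs hin.1 hin.2,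
        PySem.List.pyGetD_eq_getElem bs '0' hin.1 hin.2]
    · rw [if_neg (by rintro ⟨-, h1, h2⟩; exact hin ⟨h1, by simpa using h2⟩), if_neg hin,
        List.getElem?_replicate_of_lt hj]
  · rw [List.getElem?_eq_none
        (by rw [remapBitsA, length_scatter]; simp; omega),
      List.getElem?_eq_none
        (by rw [remapBitsB, length_foldl_write]; simp; omega)]

-- ---------- every key of Dict.ofList comes from the input pairs ----------

theorem mem_items_foldl_insert {κ ν : Type} [BEq κ] [LawfulBEq κ] (l : List (κ × ν))
    (d : PySem.Dict κ ν) (p : κ × ν)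
    (h : p ∈ (l.foldl (fun d x => d.insert x.1 x.2) d).items) :
    p.1 ∈ d.keys ∨ p.1 ∈ l.map (·.1) := by
  induction l generalizing d with
  | nil => exact Or.inl (PySem.Dict.mem_keys_of_mem_items _ h)
  | cons x l ih =>
    simp only [List.foldl_cons] at h
    rcases ih _ h with hk | hl
    · cases hcb : d.contains x.1 with
      | false =>
        rw [PySem.Dict.keys_insert_of_not_contains _ _ hcb] at hk
        rcases List.mem_append.mp hk with h1 | h2
        · exact Or.inl h1
        · simp only [List.mem_singleton] at h2
          exact Or.inr (by simp [h2])
      | true =>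
        rw [PySem.Dict.keys_insert_of_contains _ _ hcb] at hk
        exact Or.inl hk
    · exact Or.inr (by simpa using Or.inr hl)

theorem mem_items_ofList_keys (l : List (String × Int)) (p : String × Int)
    (h : p ∈ (PySem.Dict.ofList l).items) : p.1 ∈ l.map (·.1) := by
  have he : PySem.Dict.ofList l = l.foldl (fun d x => d.insert x.1 x.2) PySem.Dict.empty := rfl
  rw [he] at h
  rcases mem_items_foldl_insert l _ p h with hk | hl
  · exact absurd hk (by simp [PySem.Dict.keys_empty])
  · exact hl

-- ---------- main equality ----------

theorem remap_counts_eq (counts : List (String × Int)) (qubit_line : List Int)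
    (hpre : Pre_remap_counts counts qubit_line) :
    remap_counts counts qubit_line = remap_counts_alt counts qubit_line := by
  rw [remap_counts, remap_counts_alt]
  congr 1
  apply List.foldl_ext
  intro d p hp
  have hbs : ∀ v ∈ qubit_line, qubit_line.count v ≤ 1 ∨
      ¬(0 ≤ v ∧ v < ((p.1.toList.length : Int))) := by
    intro v hv
    rcases hpre v hv with h1 | h2
    · exact Or.inl h1
    · obtain ⟨p', hp', he⟩ := List.mem_map.mp (mem_items_ofList_keys counts p hp)
      exact Or.inr (he ▸ h2 p' hp')
  rw [key_eq qubit_line p.1.toList hbs]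

-- ===== VERDICT (by name: the statement is the Claim_ definition above) =====
theorem remap_counts_spec : Claim_equal_remap_counts := by
  intro counts qubit_line _ hpre
  unfold Spec_remap_counts
  exact remap_counts_eq counts qubit_line hpre
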